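-- pv_equiv track=rewrite | github.com/nsndimt/ChemSSP | fs_ner_utils.py | get_io_spans
-- ===== SOURCE A (Python) =====
-- from collections import Counter, OrderedDict, defaultdict, namedtuple
--
-- def get_io_spans(labels):
--     spans = []
--     span_count = Counter()
--
--     i = 0
--     while i < len(labels):
--         if labels[i] != "O":
--             start = i
--             current_label = labels[i]
--             i += 1
--             while i < len(labels) and labels[i] == current_label:
--                 i += 1
--             spans.append((start, i - 1, current_label))
--             span_count[current_label] += 1
--         else:
--             i += 1
--     return tuple(spans), span_count
-- ===== SOURCE B (Python) =====
-- from collections import Counter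
--
-- def get_io_spans(labels):
--     # Two-phase: run-length encode the labels, then emit spans/counts from runs.
--     runs = []
--     cur = None
--     cnt = 0
--     for lab in labels:
--         if cur == lab:
--             cnt += 1
--         else:
--             if cnt:
--                 runs.append((cur, cnt))
--             cur, cnt = lab, 1
--     if cnt:
--         runs.append((cur, cnt))
--
--     spans = []
--     span_count = Counter()
--     pos = 0
--     for lab, length in runs:
--         if lab != "O":
--             spans.append((pos, pos + length - 1, lab))
--             span_count[lab] += 1
--         pos += length
--     return tuple(spans), span_count
-- ===== Notes on version B (the rewrite author's own statement) =====
-- stated objective: alternative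
-- what changed: B first run-length encodes the label sequence into (label, length) runs in one pass, then a second pass over the runs emits spans and per-label counts from a running position, replacing A's index-based while loop with a nested inner scan.
import Mathlib
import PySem

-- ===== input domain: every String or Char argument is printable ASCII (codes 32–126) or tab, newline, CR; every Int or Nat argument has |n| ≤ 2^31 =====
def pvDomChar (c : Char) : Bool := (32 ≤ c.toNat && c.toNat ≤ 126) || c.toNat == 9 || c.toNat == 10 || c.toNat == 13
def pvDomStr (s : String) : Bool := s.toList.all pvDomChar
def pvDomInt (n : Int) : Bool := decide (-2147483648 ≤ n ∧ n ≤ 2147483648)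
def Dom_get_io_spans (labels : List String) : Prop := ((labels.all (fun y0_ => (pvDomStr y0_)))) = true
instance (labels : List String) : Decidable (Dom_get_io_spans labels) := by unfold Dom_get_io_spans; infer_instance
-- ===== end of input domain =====

-- B replaces A's index-based while loop (with a nested inner scan) by a two-phase
-- pass: run-length encode the labels, then emit spans/counts from the runs (alternative decomposition, same cost).

-- ===== PORT A =====
-- inner while: advance i while labels[i] == current_label
def aInner (labels : List String) (current : String) (i : Nat) : Nat :=
  if h : i < labels.length then
    if labels[i] = current then aInner labels current (i + 1) else i
  else i
termination_by labels.length - i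

-- needed for aLoop's termination (the loop index strictly increases)
theorem aInner_ge (labels : List String) (current : String) (i : Nat) :
    i ≤ aInner labels current i := by
  fun_induction aInner <;> omega

def aLoop (labels : List String) (i : Nat) (spans : List (Int × Int × String))
    (cnt : PySem.Dict String Int) : (List (Int × Int × String)) × (List (String × Int)) :=
  if h : i < labels.length then
    if labels[i] ≠ "O" then
      aLoop labels (aInner labels labels[i] (i + 1))
        (spans ++ [((i : Int), (aInner labels labels[i] (i + 1) : Int) - 1, labels[i])])
        (cnt.modify labels[i] 0 (· + 1))
    else aLoop labels (i + 1) spans cnt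
  else (spans, cnt.items)
termination_by labels.length - i
decreasing_by
  · have := aInner_ge labels labels[i] (i + 1); omega
  · omega

def get_io_spans (labels : List String) : (List (Int × Int × String)) × (List (String × Int)) :=
  aLoop labels 0 [] PySem.Dict.empty

-- ===== PORT B =====
-- first pass of Source B: run-length encoding with pending (cur, cnt)
def runsLoop (rest : List String) (cur : Option String) (cnt : Nat)
    (runs : List (String × Nat)) : List (String × Nat) :=
  match rest with
  | [] => if cnt ≠ 0 then runs ++ [(cur.getD "", cnt)] else runs
  | lab :: rest' =>
      if cur = some lab then runsLoop rest' cur (cnt + 1) runs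
      else runsLoop rest' (some lab) 1
        (if cnt ≠ 0 then runs ++ [(cur.getD "", cnt)] else runs)

-- second pass of Source B: emit spans and counts from runs with a running position
def emitLoop (runs : List (String × Nat)) (pos : Nat) (spans : List (Int × Int × String))
    (cnt : PySem.Dict String Int) : (List (Int × Int × String)) × (List (String × Int)) :=
  match runs with
  | [] => (spans, cnt.items)
  | (lab, len) :: rest =>
      if lab ≠ "O" then
        emitLoop rest (pos + len)
          (spans ++ [((pos : Int), (pos : Int) + (len : Int) - 1, lab)])
          (cnt.modify lab 0 (· + 1))
      else emitLoop rest (pos + len) spans cnt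

def get_io_spans_alt (labels : List String) : (List (Int × Int × String)) × (List (String × Int)) :=
  emitLoop (runsLoop labels none 0 []) 0 [] PySem.Dict.empty

-- ===== PRECONDITION & SPEC =====
def Spec_get_io_spans (labels : List String) (out : (List (Int × Int × String)) × (List (String × Int))) : Prop := out = get_io_spans_alt labels
instance (labels : List String) (out : (List (Int × Int × String)) × (List (String × Int))) : Decidable (Spec_get_io_spans labels out) := by unfold Spec_get_io_spans; infer_instance

-- ===== CLAIM (what is proved, stated in full; the proofs are below) =====
def Claim_equal_get_io_spans : Prop := ∀ (labels : List String), Dom_get_io_spans labels → Spec_get_io_spans labels (get_io_spans labels)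

-- ===== LEMMAS AND PROOFS =====

-- merge a pending run (c, n) onto the front of a run list
def merge (c : String) (n : Nat) (gl : List (String × Nat)) : List (String × Nat) :=
  match gl with
  | (y, m) :: rest => if c = y then (c, n + m) :: rest else (c, n) :: (y, m) :: rest
  | [] => [(c, n)]

-- pure run-length encoding (right fold)
def gRuns : List String → List (String × Nat)
  | [] => []
  | x :: xs => merge x 1 (gRuns xs)

theorem merge_head (y : String) (m : Nat) (gl : List (String × Nat)) :
    ∃ k tl, merge y m gl = (y, k) :: tl := by
  cases gl with
  | nil => exact ⟨m, [], rfl⟩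
  | cons p rest =>
    obtain ⟨z, w⟩ := p
    by_cases h : y = z
    · exact ⟨m + w, rest, by simp [merge, h]⟩
    · exact ⟨m, (z, w) :: rest, by simp [merge, h]⟩

theorem merge_merge (c : String) (a b : Nat) (gl : List (String × Nat)) :
    merge c a (merge c b gl) = merge c (a + b) gl := by
  cases gl with
  | nil => simp [merge]
  | cons p rest =>
    obtain ⟨z, w⟩ := p
    by_cases h : c = z
    · simp [merge, h]; omega
    · simp [merge, h]

theorem merge_ne (c y : String) (n m : Nat) (gl : List (String × Nat)) (h : c ≠ y) :
    merge c n (merge y m gl) = (c, n) :: merge y m gl := by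
  obtain ⟨k, tl, he⟩ := merge_head y m gl
  rw [he]; simp [merge, h]

theorem runsLoop_some (l : List String) : ∀ (c : String) (n : Nat) (acc : List (String × Nat)),
    runsLoop l (some c) (n + 1) acc = acc ++ merge c (n + 1) (gRuns l) := by
  induction l with
  | nil => intro c n acc; simp [runsLoop, gRuns, merge]
  | cons x xs ih =>
    intro c n acc
    by_cases h : c = x
    · subst h
      rw [runsLoop, if_pos rfl, ih c (n + 1) acc, gRuns, merge_merge]
    · rw [runsLoop]
      simp only [Option.some.injEq, if_neg (by exact fun hh => h hh)]
      rw [if_pos (by omega), ih x 0 _, gRuns, merge_ne c x (n + 1) 1 _ h]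
      simp

theorem runsLoop_eq (l : List String) : runsLoop l none 0 [] = gRuns l := by
  cases l with
  | nil => simp [runsLoop, gRuns]
  | cons x xs =>
    rw [runsLoop]
    simp only [reduceCtorEq, if_false]
    rw [show (1 : Nat) = 0 + 1 from rfl, runsLoop_some xs x 0 _]
    simp [gRuns]

theorem aInner_stop (labels : List String) (c : String) (i : Nat)
    (h : ¬ i < labels.length ∨ labels[i]? ≠ some c) : aInner labels c i = i := by
  rw [aInner]
  rcases h with h | h
  · simp [h]
  · split
    · next hlt =>
      rw [if_neg]
      intro he
      exact h (by rw [List.getElem?_eq_getElem hlt, he])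
    · rfl

theorem aInner_step (labels : List String) (c : String) (i : Nat)
    (hlt : i < labels.length) (he : labels[i] = c) :
    aInner labels c i = aInner labels c (i + 1) := by
  rw [aInner]; simp [hlt, he]

-- one step of the emit loop on an "O" run / a non-"O" run
theorem emitLoop_skip (len : Nat) (rest : List (String × Nat)) (pos : Nat)
    (spans : List (Int × Int × String)) (cnt : PySem.Dict String Int) :
    emitLoop (("O", len) :: rest) pos spans cnt = emitLoop rest (pos + len) spans cnt := by
  rw [emitLoop.eq_def]; simp

theorem emitLoop_take (lab : String) (len : Nat) (rest : List (String × Nat)) (pos : Nat)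
    (spans : List (Int × Int × String)) (cnt : PySem.Dict String Int) (h : lab ≠ "O") :
    emitLoop ((lab, len) :: rest) pos spans cnt =
      emitLoop rest (pos + len)
        (spans ++ [((pos : Int), (pos : Int) + (len : Int) - 1, lab)])
        (cnt.modify lab 0 (· + 1)) := by
  rw [emitLoop.eq_def]; simp [h]

-- the run starting at a position i equals (labels[i], inner-scan length) followed by the rest
theorem gRun (labels : List String) (i : Nat) (h : i < labels.length) :
    gRuns (labels.drop i) =
      (labels[i], aInner labels labels[i] (i + 1) - i) ::
        gRuns (labels.drop (aInner labels labels[i] (i + 1))) := by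
  rw [List.drop_eq_getElem_cons h, gRuns]
  by_cases h1 : i + 1 < labels.length
  · by_cases h2 : labels[i + 1] = labels[i]
    · have hstep : aInner labels labels[i] (i + 1) = aInner labels labels[i] (i + 2) :=
        aInner_step labels labels[i] (i + 1) h1 h2
      have ih := gRun labels (i + 1) h1
      rw [h2] at ih
      rw [ih, hstep]
      have hge : i + 2 <= aInner labels labels[i] (i + 2) := aInner_ge _ _ _
      simp only [merge, if_true]
      rw [show 1 + (aInner labels labels[i] (i + 2) - (i + 1)) =
            aInner labels labels[i] (i + 2) - i by omega]
    · have hstop : aInner labels labels[i] (i + 1) = i + 1 :=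
        aInner_stop _ _ _ (Or.inr (by rw [List.getElem?_eq_getElem h1]; simpa using h2))
      rw [hstop]
      rw [List.drop_eq_getElem_cons h1, gRuns,
        merge_ne labels[i] labels[i+1] 1 1 _ (fun he => h2 he.symm)]
      simp
  · have hstop : aInner labels labels[i] (i + 1) = i + 1 :=
      aInner_stop _ _ _ (Or.inl h1)
    rw [hstop, List.drop_eq_nil_of_le (by omega)]
    simp [gRuns, merge]
termination_by labels.length - i

theorem aLoop_eq_emit (labels : List String) (i : Nat) (spans : List (Int × Int × String))
    (cnt : PySem.Dict String Int) :
    aLoop labels i spans cnt = emitLoop (gRuns (labels.drop i)) i spans cnt := by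
  rw [aLoop]
  by_cases h : i < labels.length
  · simp only [dif_pos h]
    by_cases hO : labels[i] = "O"
    · simp only [hO, ne_eq, not_true_eq_false, if_false]
      rw [aLoop_eq_emit labels (i + 1) spans cnt]
      rw [List.drop_eq_getElem_cons h, gRuns, hO]
      rcases hgl : gRuns (labels.drop (i + 1)) with _ | ⟨⟨y, m⟩, rest⟩
      · simp [merge, emitLoop]
      · by_cases hy : "O" = y
        · subst hy
          simp only [merge, if_true]
          rw [emitLoop_skip, emitLoop_skip, show i + (1 + m) = i + 1 + m by omega]
        · simp only [merge, if_neg hy]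
          rw [emitLoop_skip]
    · simp only [ne_eq, hO, not_false_eq_true, if_true]
      rw [aLoop_eq_emit labels (aInner labels labels[i] (i + 1)) _ _]
      rw [gRun labels i h, emitLoop_take _ _ _ _ _ _ hO]
      have hge : i + 1 <= aInner labels labels[i] (i + 1) := aInner_ge _ _ _
      congr 2
      · omega
      · congr 3
        push_cast [Nat.cast_sub (by omega : i <= aInner labels labels[i] (i + 1))]
        ring
  · simp only [dif_neg h]
    rw [List.drop_eq_nil_of_le (by omega), gRuns, emitLoop]
termination_by labels.length - i
decreasing_by
  · omega
  · have := aInner_ge labels labels[i] (i + 1); omega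

-- ===== VERDICT (by name: the statement is the Claim_ definition above) =====
theorem get_io_spans_spec : Claim_equal_get_io_spans := by
  intro labels _
  unfold Spec_get_io_spans get_io_spans get_io_spans_alt
  rw [aLoop_eq_emit, runsLoop_eq]
  rfl
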